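-- pv_equiv track=rewrite | github.com/lapillo/adventofcode2023 | zadanie_13/app.py | get_mirror_lines
-- ===== SOURCE A (Python) =====
-- def get_mirror_lines(tablica,vertical=False):
--
--     if vertical: tablica = rotate_tab(tablica)
--
--     ind = [i for i in range(len(tablica)-1) if tablica[i+1].count(tablica[i])>0 ]
--     if len(ind) == 0: return (0,0)
--
--     res=[]
--     for i in ind:
--         off=0
--         ind
--         for t1,t2 in zip(tablica[0:i+1][::-1],tablica[i+1:]):
--             if t1!=t2: break
--             off+=1
--         if any([off+i==len(tablica)-1, i-off+1 == 0]): res.append((off, i))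
--     if len(res) == 0: return (0,0)
--     off, ind = max(res)
--
--     return off, ((ind+1)*100 if not vertical else (ind+1))
--
-- def rotate_tab(tablica):
--     return [''.join(list(x)) for x in zip(*tablica)]
-- ===== SOURCE B (Python) =====
-- def rotate_tab(tablica):
--     return [''.join(list(x)) for x in zip(*tablica)]
--
-- def get_mirror_lines(tablica, vertical=False):
--     # For each split i, a valid reflection must reach an edge, i.e. the
--     # min(i+1, n-1-i) rows on both sides of the split mirror each other exactly.
--     if vertical:
--         tablica = rotate_tab(tablica)
--     n = len(tablica)
--     res = []
--     for i in range(n - 1):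
--         m = min(i + 1, n - 1 - i)
--         if tablica[i + 1 - m:i + 1] == tablica[i + 1:i + 1 + m][::-1]:
--             res.append((m, i))
--     if not res:
--         return (0, 0)
--     off, ind = max(res)
--     return off, ((ind + 1) if vertical else (ind + 1) * 100)
-- ===== Notes on version B (the rewrite author's own statement) =====
-- stated objective: simpler
-- what changed: B drops A's adjacent-row substring prefilter and the inner outward-expansion loop with break; instead it tests each split point directly with one edge-anchored slice comparison (the min(i+1,n-1-i) rows on both sides of the split must mirror each other), collecting (off,i) pairs the same way.
import Mathlib
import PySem

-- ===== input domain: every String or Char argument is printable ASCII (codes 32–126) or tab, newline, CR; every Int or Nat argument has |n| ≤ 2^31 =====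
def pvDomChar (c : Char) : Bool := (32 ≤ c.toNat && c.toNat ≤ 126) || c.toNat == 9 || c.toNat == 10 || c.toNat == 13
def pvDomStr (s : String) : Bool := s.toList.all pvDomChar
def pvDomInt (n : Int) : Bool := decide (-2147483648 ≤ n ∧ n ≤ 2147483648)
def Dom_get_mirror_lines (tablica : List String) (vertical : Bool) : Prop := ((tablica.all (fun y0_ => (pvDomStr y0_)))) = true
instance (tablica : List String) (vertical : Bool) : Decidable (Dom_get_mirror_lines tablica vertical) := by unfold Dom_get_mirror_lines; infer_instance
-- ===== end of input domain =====

-- B replaces A's substring prefilter + inner expansion loop by a single edge-anchored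
-- slice comparison per split point (simpler decomposition, same asymptotic cost).

-- ===== PORT A =====

-- rotate_tab: zip(*tablica) truncates to the shortest row, ''.join rebuilds strings.
-- Hand port (PySem has no zip(*...)): exact because zip(*rows) yields min-length many
-- tuples, the j-th holding row[j] of every row (j is always in range, so getD's
-- default is never read).
def rotateTab (tablica : List String) : List String :=
  let rows := tablica.map String.toList
  let m := ((rows.map List.length).min?).getD 0
  (List.range m).map (fun j => String.ofList (rows.map (fun r => r.getD j ' ')))

-- inner loop 'for t1,t2 in zip(...): if t1!=t2: break; off+=1'
def offCount : List String → List String → Nat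
  | t1 :: r1, t2 :: r2 => if t1 ≠ t2 then 0 else offCount r1 r2 + 1
  | _, _ => 0

-- Python max(res) on int pairs: lexicographic, strict improvement replaces (first maximum wins)
def lexGt (x y : Nat × Nat) : Bool := x.1 > y.1 || (x.1 == y.1 && x.2 > y.2)
def pyMaxPair : List (Nat × Nat) → Nat × Nat
  | [] => (0, 0)   -- unreachable: both ports call it on a non-empty list only
  | x :: xs => xs.foldl (fun b y => if lexGt y b then y else b) x

-- indices i and i+1 below are provably in range (i < len-1), so getD's default is never read
def get_mirror_lines (tablica : List String) (vertical : Bool) : Int × Int :=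
  let tab := if vertical then rotateTab tablica else tablica
  let ind := (List.range (tab.length - 1)).filter
      (fun i => 0 < PySem.Str.count (tab.getD (i+1) "") (tab.getD i ""))
  if ind = [] then ((0 : Int), (0 : Int)) else
  let res := ind.foldl (fun (acc : List (Nat × Nat)) (i : Nat) =>
      let off := offCount ((PySem.List.slice tab (some 0) (some ((i : Int) + 1))).reverse)
                          (PySem.List.slice tab (some ((i : Int) + 1)) none)
      if off + i = tab.length - 1 ∨ (i : Int) - (off : Int) + 1 = 0
      then acc ++ [(off, i)] else acc) ([] : List (Nat × Nat))
  if res = [] then ((0 : Int), (0 : Int)) else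
  let p := pyMaxPair res
  ((p.1 : Int), if !vertical then ((p.2 : Int) + 1) * 100 else (p.2 : Int) + 1)

-- ===== PORT B =====
def get_mirror_lines_alt (tablica : List String) (vertical : Bool) : Int × Int :=
  let tab := if vertical then rotateTab tablica else tablica
  let n := tab.length
  let res := (List.range (n - 1)).foldl (fun (acc : List (Nat × Nat)) (i : Nat) =>
      let m := min (i + 1) (n - 1 - i)
      -- tablica[i+1-m:i+1] == tablica[i+1:i+1+m][::-1]  ([::-1] is reverse)
      if PySem.List.slice tab (some ((i : Int) + 1 - (m : Int))) (some ((i : Int) + 1))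
         = (PySem.List.slice tab (some ((i : Int) + 1)) (some ((i : Int) + 1 + (m : Int)))).reverse
      then acc ++ [(m, i)] else acc) ([] : List (Nat × Nat))
  if res = [] then ((0 : Int), (0 : Int)) else
  let p := pyMaxPair res
  ((p.1 : Int), if vertical then (p.2 : Int) + 1 else ((p.2 : Int) + 1) * 100)

-- ===== PRECONDITION & SPEC =====
def Spec_get_mirror_lines (tablica : List String) (vertical : Bool) (out : Int × Int) : Prop := out = get_mirror_lines_alt tablica vertical
instance (tablica : List String) (vertical : Bool) (out : Int × Int) : Decidable (Spec_get_mirror_lines tablica vertical out) := by unfold Spec_get_mirror_lines; infer_instance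

-- ===== CLAIM (what is proved, stated in full; the proofs are below) =====
def Claim_equal_get_mirror_lines : Prop := ∀ (tablica : List String) (vertical : Bool), Dom_get_mirror_lines tablica vertical → Spec_get_mirror_lines tablica vertical (get_mirror_lines tablica vertical)

-- ===== LEMMAS AND PROOFS =====

-- s.count(s) ≥ 1 in Python (even for s = '')
lemma count_self_pos (s : String) : 0 < PySem.Str.count s s := by
  show 0 < PySem.Chars.count s.toList s.toList
  rcases hs : s.toList with _ | ⟨h, t⟩
  · simp [PySem.Chars.count]
  · show 0 < PySem.Chars.count.go (h::t) (t.length+1) (h::t) 0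
    rw [PySem.Chars.count.go]
    simp only [List.isPrefixOf_iff_prefix, List.prefix_refl, if_true, List.length_cons]
    rw [show List.drop (t.length+1) (h::t) = [] by simp]
    cases t <;> rw [PySem.Chars.count.go.eq_def] <;> simp

lemma offCount_le : ∀ (xs ys : List String), offCount xs ys ≤ min xs.length ys.length
  | [], ys => by simp [offCount]
  | _ :: _, [] => by simp [offCount]
  | x :: xs, y :: ys => by
    have := offCount_le xs ys
    simp only [offCount]
    split <;> simp <;> omega

lemma offCount_take : ∀ (xs ys : List String),
    xs.take (offCount xs ys) = ys.take (offCount xs ys)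
  | [], ys => by simp [offCount]
  | _ :: _, [] => by simp [offCount]
  | x :: xs, y :: ys => by
    have ih := offCount_take xs ys
    simp only [offCount]
    split
    · simp
    · next h =>
      simp only [List.take_succ_cons, ih]
      simp at h
      rw [h]

lemma le_offCount : ∀ (xs ys : List String) (k : Nat), k ≤ xs.length → k ≤ ys.length →
    xs.take k = ys.take k → k ≤ offCount xs ys
  | _, _, 0, _, _, _ => Nat.zero_le _
  | x :: xs, y :: ys, k+1, hx, hy, h => by
    simp only [List.take_succ_cons, List.cons.injEq] at h
    have := le_offCount xs ys k (by simpa using hx) (by simpa using hy) h.2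
    simp only [offCount, h.1]
    simp
    omega
  | [], _, k+1, hx, _, _ => by simp at hx
  | _ :: _, [], k+1, _, hy, _ => by simp at hy

-- Prop-condition form of PySem.List.foldl_append_if
lemma foldl_append_ite_map {A B : Type} (p : A → Prop) [DecidablePred p] (f : A → B)
    (l : List A) (acc : List B) :
    l.foldl (fun acc x => if p x then acc ++ [f x] else acc) acc
      = acc ++ (l.filter (fun x => decide (p x))).map f := by
  rw [← PySem.List.foldl_append_if (fun x => decide (p x)) f]
  simp

-- the two slice shapes of port B, on natural in-range bounds
lemma sliceB_left (tab : List String) (i m : Nat) (hm : m ≤ i + 1) :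
    PySem.List.slice tab (some ((i : Int) + 1 - (m : Int))) (some ((i : Int) + 1))
      = (tab.drop (i + 1 - m)).take m := by
  rw [show ((i : Int) + 1 - (m : Int)) = ((i + 1 - m : Nat) : Int) by push_cast [hm]; ring,
      show ((i : Int) + 1) = ((i + 1 : Nat) : Int) by push_cast; ring,
      PySem.List.slice_natCast]
  congr 1
  omega

lemma sliceB_right (tab : List String) (i m : Nat) :
    PySem.List.slice tab (some ((i : Int) + 1)) (some ((i : Int) + 1 + (m : Int)))
      = (tab.drop (i + 1)).take m := by
  rw [show ((i : Int) + 1) = ((i + 1 : Nat) : Int) by push_cast; ring,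
      show (((i + 1 : Nat) : Int) + (m : Int)) = ((i + 1 + m : Nat) : Int) by push_cast; ring,
      PySem.List.slice_natCast]
  congr 1
  omega

-- the two slice shapes of port A
lemma sliceA_left (tab : List String) (i : Nat) :
    PySem.List.slice tab (some 0) (some ((i : Int) + 1)) = tab.take (i + 1) := by
  simp only [PySem.List.slice_zero_start]
  rw [show ((i : Int) + 1) = ((i + 1 : Nat) : Int) by push_cast; ring,
      PySem.List.slice_to_natCast]

lemma sliceA_right (tab : List String) (i : Nat) :
    PySem.List.slice tab (some ((i : Int) + 1)) none = tab.drop (i + 1) := by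
  rw [show ((i : Int) + 1) = ((i + 1 : Nat) : Int) by push_cast; ring,
      PySem.List.slice_from_natCast]

-- the heart: B's edge-anchored mirror test at split i holds iff A appends at i,
-- and then A's off equals B's min(i+1, n-1-i)
lemma key_lemma (tab : List String) (i : Nat) (hi : i + 1 < tab.length) :
    ((tab.drop (i + 1 - min (i + 1) (tab.length - 1 - i))).take (min (i + 1) (tab.length - 1 - i))
       = ((tab.drop (i + 1)).take (min (i + 1) (tab.length - 1 - i))).reverse
     ↔ (0 < PySem.Str.count (tab.getD (i + 1) "") (tab.getD i "") ∧
        (offCount ((tab.take (i + 1)).reverse) (tab.drop (i + 1)) + i = tab.length - 1 ∨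
         (i : Int) - (offCount ((tab.take (i + 1)).reverse) (tab.drop (i + 1)) : Int) + 1 = 0)))
    ∧ ((tab.drop (i + 1 - min (i + 1) (tab.length - 1 - i))).take (min (i + 1) (tab.length - 1 - i))
       = ((tab.drop (i + 1)).take (min (i + 1) (tab.length - 1 - i))).reverse
       → offCount ((tab.take (i + 1)).reverse) (tab.drop (i + 1)) = min (i + 1) (tab.length - 1 - i)) := by
  set n := tab.length with hn
  set m := min (i + 1) (n - 1 - i) with hmdef
  set L := (tab.take (i + 1)).reverse with hLdef
  set R := tab.drop (i + 1) with hRdef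
  set off := offCount L R with hoffdef
  have hL : L.length = i + 1 := by simp [hLdef]; omega
  have hR : R.length = n - 1 - i := by simp [hRdef, hn]; omega
  have hmL : m ≤ i + 1 := Nat.min_le_left _ _
  have hmR : m ≤ n - 1 - i := Nat.min_le_right _ _
  have hm1 : 1 ≤ m := by omega
  have hoffle : off ≤ m := by
    have h1 : off ≤ L.length := (offCount_le L R).trans (Nat.min_le_left _ _)
    have h2 : off ≤ R.length := (offCount_le L R).trans (Nat.min_le_right _ _)
    rw [hL] at h1
    rw [hR] at h2
    omega
  -- rewrite B's left list as (L.take m).reverse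
  have hleft : (tab.drop (i + 1 - m)).take m = (L.take m).reverse := by
    rw [hLdef, List.take_reverse, List.length_take, List.reverse_reverse,
        show min (i + 1) tab.length = i + 1 by omega, List.drop_take,
        show i + 1 - (i + 1 - m) = m by omega]
  have hBiff : ((tab.drop (i + 1 - m)).take m = (R.take m).reverse ↔ L.take m = R.take m) := by
    rw [hleft]
    exact List.reverse_inj
  have hofftake : L.take m = R.take m ↔ off = m := by
    constructor
    · intro h
      have := le_offCount L R m (by omega) (by omega) h
      omega
    · intro h
      have := offCount_take L R
      rw [hoffdef] at h
      rw [← h]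
      exact this
  constructor
  · rw [hBiff, hofftake]
    constructor
    · intro hoff
      constructor
      · -- equal first elements give equal adjacent rows, and s.count(s) > 0
        have htk : L.take m = R.take m := hofftake.mpr hoff
        have h0 : L[0]? = R[0]? := by
          have := congrArg (fun l => l[0]?) htk
          simpa [List.getElem?_take_of_lt hm1] using this
        have hLi : L[0]? = some (tab.getD i "") := by
          rw [hLdef, List.getElem?_reverse (by simp; omega)]
          rw [List.length_take]
          rw [show min (i+1) tab.length - 1 - 0 = i by omega]
          rw [List.getElem?_take_of_lt (by omega)]
          rw [List.getD, List.getElem?_eq_getElem (by omega)]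
          simp
        have hRi : R[0]? = some (tab.getD (i + 1) "") := by
          rw [hRdef, List.getElem?_drop]
          rw [List.getD, List.getElem?_eq_getElem (by omega)]
          simp
        rw [hLi, hRi] at h0
        obtain h0 := Option.some.inj h0
        rw [← h0]
        exact count_self_pos _
      · rcases Nat.le_total (i + 1) (n - 1 - i) with hc | hc
        · right
          have : m = i + 1 := by omega
          rw [hoff, this]
          push_cast
          ring
        · left
          have : m = n - 1 - i := by omega
          rw [hoff, this]
          omega
    · rintro ⟨-, hd | hd⟩
      · omega
      · have : off = i + 1 := by omega
        omega
  · rw [hBiff, hofftake]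
    exact id

-- the two res lists coincide
lemma res_eq (tab : List String) :
    ((List.range (tab.length - 1)).filter
        (fun i => 0 < PySem.Str.count (tab.getD (i+1) "") (tab.getD i ""))).foldl
      (fun (acc : List (Nat × Nat)) (i : Nat) =>
        let off := offCount ((PySem.List.slice tab (some 0) (some ((i : Int) + 1))).reverse)
                            (PySem.List.slice tab (some ((i : Int) + 1)) none)
        if off + i = tab.length - 1 ∨ (i : Int) - (off : Int) + 1 = 0
        then acc ++ [(off, i)] else acc) []
    = (List.range (tab.length - 1)).foldl
      (fun (acc : List (Nat × Nat)) (i : Nat) =>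
        let m := min (i + 1) (tab.length - 1 - i)
        if PySem.List.slice tab (some ((i : Int) + 1 - (m : Int))) (some ((i : Int) + 1))
           = (PySem.List.slice tab (some ((i : Int) + 1)) (some ((i : Int) + 1 + (m : Int)))).reverse
        then acc ++ [(m, i)] else acc) [] := by
  rw [foldl_append_ite_map
        (p := fun i : Nat => offCount ((PySem.List.slice tab (some 0) (some ((i : Int) + 1))).reverse)
                            (PySem.List.slice tab (some ((i : Int) + 1)) none) + i = tab.length - 1 ∨
              (i : Int) - (offCount ((PySem.List.slice tab (some 0) (some ((i : Int) + 1))).reverse)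
                            (PySem.List.slice tab (some ((i : Int) + 1)) none) : Int) + 1 = 0)
        (f := fun i : Nat => (offCount ((PySem.List.slice tab (some 0) (some ((i : Int) + 1))).reverse)
                            (PySem.List.slice tab (some ((i : Int) + 1)) none), i)),
      foldl_append_ite_map
        (p := fun i : Nat => PySem.List.slice tab (some ((i : Int) + 1 - ((min (i + 1) (tab.length - 1 - i) : Nat) : Int))) (some ((i : Int) + 1))
           = (PySem.List.slice tab (some ((i : Int) + 1)) (some ((i : Int) + 1 + ((min (i + 1) (tab.length - 1 - i) : Nat) : Int)))).reverse)
        (f := fun i : Nat => (min (i + 1) (tab.length - 1 - i), i)),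
      List.filter_filter, List.nil_append, List.nil_append]
  have hcongr : ∀ i ∈ List.range (tab.length - 1),
      (decide (offCount ((PySem.List.slice tab (some 0) (some ((i : Int) + 1))).reverse)
                 (PySem.List.slice tab (some ((i : Int) + 1)) none) + i = tab.length - 1 ∨
               (i : Int) - (offCount ((PySem.List.slice tab (some 0) (some ((i : Int) + 1))).reverse)
                 (PySem.List.slice tab (some ((i : Int) + 1)) none) : Int) + 1 = 0) &&
       decide (0 < PySem.Str.count (tab.getD (i+1) "") (tab.getD i "")))
      = decide (PySem.List.slice tab (some ((i : Int) + 1 - ((min (i + 1) (tab.length - 1 - i) : Nat) : Int))) (some ((i : Int) + 1))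
           = (PySem.List.slice tab (some ((i : Int) + 1)) (some ((i : Int) + 1 + ((min (i + 1) (tab.length - 1 - i) : Nat) : Int)))).reverse) := by
    intro i hi
    rw [List.mem_range] at hi
    have hi' : i + 1 < tab.length := by omega
    have K := key_lemma tab i hi'
    rw [← Bool.decide_and, decide_eq_decide,
        sliceA_left, sliceA_right,
        sliceB_left tab i _ (Nat.min_le_left _ _), sliceB_right tab i _,
        and_comm]
    exact K.1.symm
  rw [List.filter_congr hcongr]
  apply List.map_congr_left
  intro i hmem
  rw [List.mem_filter] at hmem
  obtain ⟨hir, hp⟩ := hmem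
  rw [List.mem_range] at hir
  have hi' : i + 1 < tab.length := by omega
  have K := key_lemma tab i hi'
  have hcond := of_decide_eq_true hp
  rw [sliceB_left tab i _ (Nat.min_le_left _ _), sliceB_right tab i _] at hcond
  rw [sliceA_left, sliceA_right]
  exact Prod.ext (K.2 hcond) rfl

-- ===== VERDICT (by name: the statement is the Claim_ definition above) =====
-- assembling the final result from equal res lists (ind = [] forces an empty res on the A side)
lemma assemble {ind : List Nat} {resA resB : List (Nat × Nat)} (e : Nat × Nat → Int × Int)
    (hres : resA = resB) (hind : ind = [] → resA = []) :
    (if ind = [] then ((0 : Int), (0 : Int)) else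
      if resA = [] then ((0 : Int), (0 : Int)) else e (pyMaxPair resA))
    = (if resB = [] then ((0 : Int), (0 : Int)) else e (pyMaxPair resB)) := by
  subst hres
  by_cases h : ind = []
  · rw [if_pos h, hind h, if_pos rfl]
  · rw [if_neg h]

-- ===== VERDICT (by name: the statement is the Claim_ definition above) =====
theorem get_mirror_lines_spec : Claim_equal_get_mirror_lines := by
  intro tablica vertical _
  show get_mirror_lines tablica vertical = get_mirror_lines_alt tablica vertical
  unfold get_mirror_lines get_mirror_lines_alt
  cases vertical with
  | false =>
    dsimp only
    simp only [Bool.not_false]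
    exact assemble (fun p => ((p.1 : Int), ((p.2 : Int) + 1) * 100)) (res_eq _)
      (fun h => by rw [h]; rfl)
  | true =>
    dsimp only
    simp only [Bool.not_true]
    exact assemble (fun p => ((p.1 : Int), (p.2 : Int) + 1)) (res_eq _)
      (fun h => by rw [h]; rfl)
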